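-- pv_equiv track=rewrite | github.com/emneo-dev/epitech | tek1/maths/103cipher/load_matrix.py | load_to_mat
-- ===== SOURCE A (Python) =====
-- from math import floor
--
-- def add_rows(arr, str, length):
--     for i in range(length - 3):
--         for j in range(3):
--             arr[j].append(0)
--     return arr
--
-- def load_to_mat(str):
--     arr = [[0, 0, 0], [0, 0, 0], [0, 0, 0]]
--     length = floor(len(str) / 3) + 1
--     if (len(str) % 3 == 0):
--         length -= 1
--     if (len(str) > 9):
--         arr = add_rows(arr, str, length)
--     for i in range(length):
--         for j in range(3):
--             if i * 3 + j < len(str):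
--                 arr[j][i] = ord(str[i * 3 + j])
--     return arr
-- ===== SOURCE B (Python) =====
-- def load_to_mat(str):
--     codes = [ord(c) for c in str]
--     cols = max(3, (len(codes) + 2) // 3)
--     return [codes[j::3] + [0] * (cols - len(codes[j::3])) for j in range(3)]
-- ===== Notes on version B (the rewrite author's own statement) =====
-- stated objective: simpler
-- what changed: Instead of allocating a zero grid and filling cells by index (A grows the grid with add_rows, then runs nested loops over all cells with a bounds check), B builds each of the three rows directly as the strided slice codes[j::3] padded with zeros to the column count max(3,(n+2)//3); there is no preallocated matrix and no per-cell write.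
import Mathlib
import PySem

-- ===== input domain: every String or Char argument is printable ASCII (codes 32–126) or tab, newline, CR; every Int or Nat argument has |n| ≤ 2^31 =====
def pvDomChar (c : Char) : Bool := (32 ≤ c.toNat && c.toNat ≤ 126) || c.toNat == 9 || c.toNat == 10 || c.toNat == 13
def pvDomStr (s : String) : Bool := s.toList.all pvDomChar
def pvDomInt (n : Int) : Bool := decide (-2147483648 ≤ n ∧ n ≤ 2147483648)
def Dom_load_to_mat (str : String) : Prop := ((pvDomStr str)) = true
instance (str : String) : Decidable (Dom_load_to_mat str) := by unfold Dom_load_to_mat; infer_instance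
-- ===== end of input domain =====

-- B builds the three rows directly as strided slices codes[j::3] padded with zeros,
-- instead of A's zero-grid growth plus nested per-cell fill (objective: simpler).

-- ===== PORT A =====
-- add_rows: appends `length - 3` zero columns (one 0 to each of the 3 rows per step)
def add_rows (arr : List (List Int)) (length : Nat) : List (List Int) :=
  (List.range (length - 3)).foldl
    (fun a _ => (List.range 3).foldl (fun a j => a.modify j (· ++ [(0:Int)])) a) arr

def load_to_mat (str : String) : List (List Int) :=
  let s := str.toList
  let arr := [[(0:Int), 0, 0], [0, 0, 0], [0, 0, 0]]
  -- floor(len(str)/3)+1: float division is exact here, ported as Nat division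
  let len1 := s.length / 3 + 1
  let len2 := if s.length % 3 = 0 then len1 - 1 else len1
  let arr := if s.length > 9 then add_rows arr len2 else arr
  (List.range len2).foldl
    (fun a i => (List.range 3).foldl
      (fun a j =>
        if i * 3 + j < s.length then
          -- str[i*3+j] is in range by the guard, so getD is exact; ord = Char.toNat
          a.modify j (fun row => row.set i ((s.getD (i * 3 + j) ' ').toNat : Int))
        else a) a) arr

-- ===== PORT B =====
-- hand port of the slice codes[j::3] (start j ≥ 0, step 3): exact, since for a
-- nonnegative start Python's l[j::3] is every third element of l after dropping j
def pvStride3 {α : Type} : List α → List α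
  | [] => []
  | [x] => [x]
  | [x, _] => [x]
  | x :: _ :: _ :: rest => x :: pvStride3 rest

def load_to_mat_alt (str : String) : List (List Int) :=
  let codes := str.toList.map (fun c => (c.toNat : Int))
  let cols := max 3 ((codes.length + 2) / 3)
  (List.range 3).map (fun j =>
    pvStride3 (codes.drop j) ++ List.replicate (cols - (pvStride3 (codes.drop j)).length) 0)

-- ===== PRECONDITION & SPEC =====
def Spec_load_to_mat (str : String) (out : List (List Int)) : Prop := out = load_to_mat_alt str
instance (str : String) (out : List (List Int)) : Decidable (Spec_load_to_mat str out) := by unfold Spec_load_to_mat; infer_instance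

-- ===== CLAIM (what is proved, stated in full; the proofs are below) =====
def Claim_equal_load_to_mat : Prop := ∀ (str : String), Dom_load_to_mat str → Spec_load_to_mat str (load_to_mat str)

-- ===== LEMMAS AND PROOFS =====

-- the single write performed by A for character index idx
def pvW (s : List Char) (a : List (List Int)) (idx : Nat) : List (List Int) :=
  a.modify (idx % 3) (fun row => row.set (idx / 3) ((s.getD idx ' ').toNat : Int))

def pvCode (s : List Char) (i : Nat) : Int := ((s.getD i ' ').toNat : Int)

-- row j of A's grid after the writes for character indices < n
def pvRow (s : List Char) (cols n j : Nat) : List Int :=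
  (List.range cols).map (fun i => if 3 * i + j < n then pvCode s (3 * i + j) else 0)

theorem pvStride3_length {α : Type} (l : List α) : (pvStride3 l).length = (l.length + 2) / 3 := by
  fun_induction pvStride3 with
  | case1 => simp
  | case2 x => simp
  | case3 x y => simp
  | case4 x y z rest ih => simp [ih]; omega

theorem pvStride3_getElem? {α : Type} (l : List α) (i : Nat) :
    (pvStride3 l)[i]? = l[3 * i]? := by
  induction l using pvStride3.induct generalizing i with
  | case1 => simp [pvStride3]
  | case2 x =>
    match i with
    | 0 => rfl
    | i + 1 =>
      simp only [pvStride3]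
      rw [List.getElem?_eq_none (by simp only [List.length_cons, List.length_nil]; omega),
          List.getElem?_eq_none (by simp only [List.length_cons, List.length_nil]; omega)]
  | case3 x y =>
    match i with
    | 0 => rfl
    | i + 1 =>
      simp only [pvStride3]
      rw [List.getElem?_eq_none (by simp only [List.length_cons, List.length_nil]; omega),
          List.getElem?_eq_none (by simp only [List.length_cons, List.length_nil]; omega)]
  | case4 x y z rest ih =>
    match i with
    | 0 => rfl
    | i + 1 =>
      have e : 3 * (i + 1) = 3 * i + 1 + 1 + 1 := by ring
      simp only [pvStride3, List.getElem?_cons_succ, e, ih]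

theorem pv_modify0 {α : Type} (f : α → α) (a b c : α) : ([a, b, c] : List α).modify 0 f = [f a, b, c] := rfl
theorem pv_modify1 {α : Type} (f : α → α) (a b c : α) : ([a, b, c] : List α).modify 1 f = [a, f b, c] := rfl
theorem pv_modify2 {α : Type} (f : α → α) (a b c : α) : ([a, b, c] : List α).modify 2 f = [a, b, f c] := rfl

theorem pv_addrows (t : Nat) : ∀ (k : Nat),
    (List.range t).foldl
      (fun a _ => (List.range 3).foldl (fun (a : List (List Int)) j => a.modify j (· ++ [(0:Int)])) a)
      [List.replicate k (0:Int), List.replicate k 0, List.replicate k 0]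
    = [List.replicate (k + t) (0:Int), List.replicate (k + t) 0, List.replicate (k + t) 0] := by
  induction t with
  | zero => intro k; simp
  | succ t ih =>
    intro k
    have h3 : List.range 3 = [0, 1, 2] := by decide
    simp only [h3] at ih ⊢
    rw [List.range_succ, List.foldl_append, ih k]
    simp [List.modify, ← List.replicate_succ', Nat.add_assoc]

theorem pv_min_step {α : Type} (W : α → Nat → α) (n m : Nat) (a : α) :
    List.foldl W a (List.range (min n (m + 1)))
    = (if m < n then W (List.foldl W a (List.range (min n m))) m
       else List.foldl W a (List.range (min n m))) := by
  by_cases h : m < n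
  · have e1 : min n (m + 1) = m + 1 := by omega
    have e2 : min n m = m := by omega
    rw [e1, e2, List.range_succ, List.foldl_append, if_pos h]
    rfl
  · have e1 : min n (m + 1) = min n m := by omega
    rw [e1, if_neg h]

theorem pv_double_fold {α : Type} (W : α → Nat → α) (n : Nat) : ∀ (L : Nat) (a : α),
    (List.range L).foldl
      (fun a i => (List.range 3).foldl (fun a j => if 3 * i + j < n then W a (3 * i + j) else a) a) a
    = (List.range (min n (3 * L))).foldl W a := by
  intro L
  induction L with
  | zero => intro a; simp
  | succ L ih =>
    intro a
    have h3 : List.range 3 = [0, 1, 2] := by decide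
    simp only [h3] at ih ⊢
    rw [List.range_succ, List.foldl_append, ih]
    simp only [List.foldl_cons, List.foldl_nil, Nat.add_zero]
    rw [(by ring : 3 * (L + 1) = (3 * L + 2) + 1), pv_min_step,
        (by omega : (3:Nat) * L + 2 = (3 * L + 1) + 1), pv_min_step, pv_min_step]

theorem pvRow_succ_set (s : List Char) (cols n : Nat) (_hn : n < 3 * cols) :
    (pvRow s cols n (n % 3)).set (n / 3) (pvCode s n) = pvRow s cols (n + 1) (n % 3) := by
  apply List.ext_getElem
  · rw [List.length_set]; simp [pvRow]
  · intro i h1 h2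
    simp only [pvRow, List.length_map, List.length_range] at h2
    rw [List.getElem_set]
    by_cases hi : n / 3 = i
    · subst hi
      rw [if_pos rfl]
      simp only [pvRow, List.getElem_map, List.getElem_range]
      rw [if_pos (by omega : 3 * (n / 3) + n % 3 < n + 1)]
      congr 1
      omega
    · rw [if_neg hi]
      simp only [pvRow, List.getElem_map, List.getElem_range]
      have : (3 * i + n % 3 < n) ↔ (3 * i + n % 3 < n + 1) := by omega
      simp only [this]

theorem pvRow_succ_other (s : List Char) (cols n j : Nat) (hj : j % 3 ≠ n % 3) :
    pvRow s cols n j = pvRow s cols (n + 1) j := by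
  unfold pvRow
  apply List.map_congr_left
  intro i _
  have : (3 * i + j < n) ↔ (3 * i + j < n + 1) := by omega
  simp only [this]

theorem pv_fold_rows (s : List Char) (cols : Nat) : ∀ (n : Nat), n ≤ 3 * cols →
    (List.range n).foldl (pvW s) (List.replicate 3 (List.replicate cols (0:Int)))
    = [pvRow s cols n 0, pvRow s cols n 1, pvRow s cols n 2] := by
  intro n
  induction n with
  | zero =>
    intro _
    simp [pvRow, List.replicate, List.map_const']
  | succ n ih =>
    intro h
    rw [List.range_succ, List.foldl_append, ih (by omega)]
    simp only [List.foldl_cons, List.foldl_nil]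
    unfold pvW
    have hv : ((s.getD n ' ').toNat : Int) = pvCode s n := rfl
    have hset := pvRow_succ_set s cols n (by omega)
    have h0 : n % 3 = 0 ∨ n % 3 = 1 ∨ n % 3 = 2 := by omega
    rcases h0 with h0 | h0 | h0 <;> rw [h0] at hset ⊢
    · rw [pv_modify0, hv, hset,
        pvRow_succ_other s cols n 1 (by omega), pvRow_succ_other s cols n 2 (by omega)]
    · rw [pv_modify1, hv, hset,
        pvRow_succ_other s cols n 0 (by omega), pvRow_succ_other s cols n 2 (by omega)]
    · rw [pv_modify2, hv, hset,
        pvRow_succ_other s cols n 0 (by omega), pvRow_succ_other s cols n 1 (by omega)]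

-- B's row j equals A's row j
theorem pv_row_eq (s : List Char) (j : Nat) (hj : j < 3) :
    pvStride3 ((s.map (fun c => (c.toNat : Int))).drop j)
      ++ List.replicate (max 3 ((s.length + 2) / 3) - (pvStride3 ((s.map (fun c => (c.toNat : Int))).drop j)).length) 0
    = pvRow s (max 3 ((s.length + 2) / 3)) s.length j := by
  set codes := s.map (fun c => (c.toNat : Int)) with hcodes
  set cols := max 3 ((s.length + 2) / 3) with hcols
  have hclen : codes.length = s.length := by simp [hcodes]
  have hlen : (pvStride3 (codes.drop j)).length = (s.length - j + 2) / 3 := by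
    rw [pvStride3_length]; simp [hclen]
  have hle : (s.length - j + 2) / 3 ≤ cols := by rw [hcols]; omega
  apply List.ext_getElem?
  intro i
  by_cases hi : i < cols
  · have hA : (pvRow s cols s.length j)[i]? =
        some (if 3 * i + j < s.length then pvCode s (3 * i + j) else 0) := by
      simp [pvRow, hi]
    rw [hA]
    by_cases hlt : i < (s.length - j + 2) / 3
    · have h3 : 3 * i + j < s.length := by omega
      rw [List.getElem?_append_left (by omega)]
      rw [pvStride3_getElem?, List.getElem?_drop,
          show j + 3 * i = 3 * i + j from by ring,
          List.getElem?_eq_getElem (by rw [hclen]; omega)]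
      simp only [hcodes, List.getElem_map]
      rw [if_pos h3]
      simp only [pvCode, List.getD]
      rw [List.getElem?_eq_getElem h3]
      rfl
    · have h3 : ¬ (3 * i + j < s.length) := by omega
      rw [List.getElem?_append_right (by omega), if_neg h3]
      rw [List.getElem?_replicate]
      rw [if_pos (by omega)]
  · rw [List.getElem?_eq_none, List.getElem?_eq_none]
    · simp [pvRow]; omega
    · simp [hlen]; omega

theorem load_to_mat_spec_aux (str : String) : load_to_mat str = load_to_mat_alt str := by
  unfold load_to_mat load_to_mat_alt
  dsimp only
  generalize str.toList = s
  have hlen : (if s.length % 3 = 0 then s.length / 3 + 1 - 1 else s.length / 3 + 1)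
      = (s.length + 2) / 3 := by split_ifs <;> omega
  rw [hlen]
  have hclen : (s.map (fun c => (c.toNat : Int))).length = s.length := by simp
  rw [hclen]
  have hgrid : (if s.length > 9 then add_rows [[(0:Int),0,0],[0,0,0],[0,0,0]] ((s.length + 2) / 3)
                 else [[(0:Int),0,0],[0,0,0],[0,0,0]])
      = List.replicate 3 (List.replicate (max 3 ((s.length + 2) / 3)) (0:Int)) := by
    split_ifs with h9
    · unfold add_rows
      have h0 : [[(0:Int),0,0],[0,0,0],[0,0,0]]
          = [List.replicate 3 (0:Int), List.replicate 3 0, List.replicate 3 0] := by decide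
      rw [h0, pv_addrows]
      have e1 : 3 + ((s.length + 2) / 3 - 3) = (s.length + 2) / 3 := by omega
      have e2 : max 3 ((s.length + 2) / 3) = (s.length + 2) / 3 := by omega
      rw [e1, e2]; rfl
    · have e : max 3 ((s.length + 2) / 3) = 3 := by omega
      rw [e]; decide
  rw [hgrid]
  have hbridge : (List.range ((s.length + 2) / 3)).foldl
      (fun a i => (List.range 3).foldl
        (fun a j => if i * 3 + j < s.length then
            a.modify j (fun row => row.set i ((s.getD (i * 3 + j) ' ').toNat : Int))
          else a) a)
      (List.replicate 3 (List.replicate (max 3 ((s.length + 2) / 3)) (0:Int)))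
      = (List.range ((s.length + 2) / 3)).foldl
        (fun a i => (List.range 3).foldl
          (fun a j => if 3 * i + j < s.length then pvW s a (3 * i + j) else a) a)
        (List.replicate 3 (List.replicate (max 3 ((s.length + 2) / 3)) (0:Int))) := by
    apply PySem.List.foldl_congr_mem
    intro acc i _
    apply PySem.List.foldl_congr_mem
    intro a j hj
    have hj3 : j < 3 := List.mem_range.mp hj
    have e1 : i * 3 + j = 3 * i + j := by ring
    have e2 : (3 * i + j) % 3 = j := by omega
    have e3 : (3 * i + j) / 3 = i := by omega
    unfold pvW
    rw [e1, e2, e3]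
  rw [hbridge, pv_double_fold (pvW s) s.length ((s.length + 2) / 3)]
  have e : min s.length (3 * ((s.length + 2) / 3)) = s.length := by omega
  rw [e, pv_fold_rows s (max 3 ((s.length + 2) / 3)) s.length (by omega)]
  have h3 : List.range 3 = [0, 1, 2] := by decide
  rw [h3]
  simp only [List.map_cons, List.map_nil]
  rw [pv_row_eq s 0 (by omega), pv_row_eq s 1 (by omega), pv_row_eq s 2 (by omega)]

-- ===== VERDICT (by name: the statement is the Claim_ definition above) =====
theorem load_to_mat_spec : Claim_equal_load_to_mat := by
  intro str _
  exact load_to_mat_spec_aux str
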